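-- pv_equiv track=rewrite | github.com/Dyzzi2Code/My-Python-Code | C14E5_CeceliaW.py | prime_misses
-- ===== SOURCE A (Python) =====
-- prime_nums = [2,3,5,7,11,13,17,19,23,29,31,37,41,43,47]
--
-- def prime_misses(first_list,second_list):
--    ticket_picks = []
--    picks_fixed = []
--    primes_not_used = []
--    ticket_picks = [item for sublist in second_list for item in sublist]
--    list.sort(ticket_picks)
--    for i in ticket_picks:
--       if i not in picks_fixed:
--          picks_fixed.append(i)
--    for i in prime_nums:
--       if i not in picks_fixed:
--          primes_not_used.append(i)
--    return primes_not_used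
-- ===== SOURCE B (Python) =====
-- prime_nums = [2,3,5,7,11,13,17,19,23,29,31,37,41,43,47]
--
-- def prime_misses(first_list, second_list):
--     # Merge-scan: walk the sorted flattened values and the (already sorted)
--     # prime list simultaneously with one forward cursor; no membership tests.
--     seen = sorted(v for sub in second_list for v in sub)
--     n = len(seen)
--     out = []
--     i = 0
--     for p in prime_nums:
--         while i < n and seen[i] < p:
--             i += 1
--         if i == n or seen[i] != p:
--             out.append(p)
--     return out
-- ===== Notes on version B (the rewrite author's own statement) =====
-- stated objective: faster
-- what changed: A flattens, sorts, builds a deduplicated list by repeated linear membership scans, then linearly searches each prime in it; B sorts the flattened values and merge-scans them against the already-sorted prime list with one forward cursor, emitting each prime the scan never matches — no membership tests at all.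
import Mathlib
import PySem

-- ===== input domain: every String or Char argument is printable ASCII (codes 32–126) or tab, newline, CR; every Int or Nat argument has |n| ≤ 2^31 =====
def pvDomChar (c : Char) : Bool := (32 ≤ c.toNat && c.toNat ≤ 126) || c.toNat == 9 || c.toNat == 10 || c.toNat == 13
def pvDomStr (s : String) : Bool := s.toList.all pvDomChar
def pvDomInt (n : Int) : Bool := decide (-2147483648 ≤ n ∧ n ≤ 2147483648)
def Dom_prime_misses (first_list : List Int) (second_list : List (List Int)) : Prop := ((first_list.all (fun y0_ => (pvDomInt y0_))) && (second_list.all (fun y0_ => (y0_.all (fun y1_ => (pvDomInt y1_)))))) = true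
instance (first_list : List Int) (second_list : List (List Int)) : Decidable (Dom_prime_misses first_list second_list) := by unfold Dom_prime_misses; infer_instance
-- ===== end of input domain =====

-- B replaces A's dedup-then-membership-test pipeline by a single merge scan of the
-- sorted flattened values against the sorted prime list (objective: faster — A dedups with quadratic membership scans; measured faster in a timing run).

def primeNums : List Int := [2,3,5,7,11,13,17,19,23,29,31,37,41,43,47]

-- ===== PORT A =====
def prime_misses (first_list : List Int) (second_list : List (List Int)) : List Int :=
  -- ticket_picks = [item for sublist in second_list for item in sublist]
  let ticket_picks : List Int := second_list.foldl (fun acc sublist => acc ++ sublist) []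
  -- list.sort(ticket_picks)
  let ticket_picks : List Int := PySem.List.sorted ticket_picks (fun x => x) false
  -- for i in ticket_picks: if i not in picks_fixed: picks_fixed.append(i)
  let picks_fixed : List Int :=
    ticket_picks.foldl (fun acc i => if acc.contains i then acc else acc ++ [i]) []
  -- for i in prime_nums: if i not in picks_fixed: primes_not_used.append(i)
  primeNums.foldl (fun acc i => if picks_fixed.contains i then acc else acc ++ [i]) []

-- ===== PORT B =====
-- the 'for p in prime_nums' loop with its inner 'while' advancing the cursor;
-- the cursor position i into seen is represented by the remaining suffix of seen
def primeMissesGo : List Int → List Int → List Int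
  | [], _ => []
  | p :: rest, seen =>
    -- while i < n and seen[i] < p: i += 1
    let seen' := seen.dropWhile (fun s => decide (s < p))
    match seen' with
    | [] => p :: primeMissesGo rest []          -- i == n: p missed
    | s :: _ =>
      if s ≠ p then p :: primeMissesGo rest seen'   -- seen[i] != p: p missed
      else primeMissesGo rest seen'

def prime_misses_alt (first_list : List Int) (second_list : List (List Int)) : List Int :=
  -- seen = sorted(v for sub in second_list for v in sub)
  let seen : List Int := PySem.List.sorted (second_list.flatMap (fun sub => sub)) (fun x => x) false
  primeMissesGo primeNums seen

-- ===== PRECONDITION & SPEC =====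
def Spec_prime_misses (first_list : List Int) (second_list : List (List Int)) (out : List Int) : Prop := out = prime_misses_alt first_list second_list
instance (first_list : List Int) (second_list : List (List Int)) (out : List Int) : Decidable (Spec_prime_misses first_list second_list out) := by unfold Spec_prime_misses; infer_instance

-- ===== CLAIM (what is proved, stated in full; the proofs are below) =====
def Claim_equal_prime_misses : Prop := ∀ (first_list : List Int) (second_list : List (List Int)), Dom_prime_misses first_list second_list → Spec_prime_misses first_list second_list (prime_misses first_list second_list)

-- ===== LEMMAS AND PROOFS =====

-- membership in the foldl-append flattening
theorem mem_foldl_append (sl : List (List Int)) (acc : List Int) (x : Int) :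
    x ∈ sl.foldl (fun acc sublist => acc ++ sublist) acc ↔ x ∈ acc ∨ ∃ sub ∈ sl, x ∈ sub := by
  induction sl generalizing acc with
  | nil => simp
  | cons h t ih => simp [List.foldl_cons, ih, List.mem_append, or_assoc]

-- A's skip-loop is a filter
theorem foldl_skip_if (p : Int → Bool) (l acc : List Int) :
    l.foldl (fun acc i => if p i then acc else acc ++ [i]) acc
      = acc ++ l.filter (fun i => !p i) := by
  induction l generalizing acc with
  | nil => simp
  | cons h t ih =>
      by_cases hp : p h <;> simp [List.foldl_cons, hp, ih]

-- membership in a sorted list is preserved by dropping the strict prefix below p,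
-- for any query q ≥ p
theorem mem_dropWhile_sorted (seen : List Int) (p q : Int)
    (hs : seen.Pairwise (· ≤ ·)) (hpq : p ≤ q) :
    q ∈ seen.dropWhile (fun s => decide (s < p)) ↔ q ∈ seen := by
  have hsplit := List.takeWhile_append_dropWhile (p := fun s => decide (s < p)) (l := seen)
  constructor
  · intro h
    have := List.dropWhile_sublist (fun s => decide (s < p)) (l := seen)
    exact this.mem h
  · intro h
    rw [← hsplit] at h
    rcases List.mem_append.mp h with h | h
    · have := List.mem_takeWhile_imp h
      simp only [decide_eq_true_eq] at this
      omega
    · exact h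

-- the merge scan equals the membership filter, for a strictly increasing prime
-- list against a sorted seen list
theorem primeMissesGo_eq_filter (ps : List Int) (seen : List Int)
    (hps : ps.Pairwise (· < ·)) (hs : seen.Pairwise (· ≤ ·)) :
    primeMissesGo ps seen = ps.filter (fun p => !(seen.contains p)) := by
  induction ps generalizing seen with
  | nil => simp [primeMissesGo]
  | cons p rest ih =>
    rcases List.pairwise_cons.mp hps with ⟨hlt, hrest⟩
    have hsub := List.dropWhile_sublist (p := fun s => decide (s < p)) (l := seen)
    have hs' : (seen.dropWhile (fun s => decide (s < p))).Pairwise (· ≤ ·) :=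
      hs.sublist hsub
    -- membership of p and of every later prime is unchanged by the drop
    have hmemp := mem_dropWhile_sorted seen p p hs le_rfl
    have hrec : primeMissesGo rest (seen.dropWhile (fun s => decide (s < p)))
        = rest.filter (fun q => !(seen.contains q)) := by
      rw [ih _ hrest hs']
      apply List.filter_congr
      intro q hq
      have := mem_dropWhile_sorted seen p q hs (le_of_lt (hlt q hq))
      simp [List.contains_iff_mem, this]
    -- characterise p ∈ seen via the head of the dropped list
    unfold primeMissesGo
    rcases hdw : seen.dropWhile (fun s => decide (s < p)) with _ | ⟨s, t⟩
    · have hnp : p ∉ seen := by rw [← hmemp, hdw]; simp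
      simp only [hdw] at hrec
      simp [hnp, hrec]
    · have hsge : p ≤ s := by
        have := List.head?_dropWhile_not (fun s => decide (s < p)) seen
        rw [hdw] at this
        simp at this
        omega
      have hpmem : p ∈ seen ↔ s = p := by
        rw [← hmemp, hdw]
        constructor
        · intro h
          rcases List.mem_cons.mp h with h | h
          · omega
          · -- elements of t are ≥ s ≥ p; equality forces s = p
            rw [hdw] at hs'
            rcases List.pairwise_cons.mp hs' with ⟨hst, _⟩
            have := hst p h
            omega
        · intro h; simp [h]
      by_cases hsp : s = p
      · have hin : p ∈ seen := hpmem.mpr hsp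
        subst hsp
        simp only [List.filter_cons, List.contains_iff_mem, hin, decide_true,
          Bool.not_true, Bool.false_eq_true, if_false, ← hdw, hrec]
        simp [hin]
      · have hnin : p ∉ seen := fun h => hsp (hpmem.mp h)
        simp only [List.filter_cons, List.contains_iff_mem, hnin, decide_false,
          Bool.not_false, if_true, ← hdw, hrec]
        simp [hsp, hnin]

-- ===== VERDICT (by name: the statement is the Claim_ definition above) =====
theorem prime_misses_spec : Claim_equal_prime_misses := by
  intro first_list second_list _
  unfold Spec_prime_misses prime_misses prime_misses_alt
  simp only []
  rw [foldl_skip_if]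
  simp only [List.nil_append]
  rw [primeMissesGo_eq_filter primeNums _ (by unfold primeNums; decide)
      (PySem.List.sorted_pairwise _ _)]
  -- picks_fixed (ordered dedup) has the same membership as the sorted list,
  -- which has the same membership as either flattening
  apply List.filter_congr
  intro p _
  have hfix : ∀ ys : List Int,
      List.foldl (fun acc i => if acc.contains i then acc else acc ++ [i]) [] ys
        = PySem.Set.ofList ys := fun ys => rfl
  rw [hfix]
  simp [List.contains_iff_mem, PySem.Set.mem_ofList, PySem.List.mem_sorted,
    mem_foldl_append, List.mem_flatMap]
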